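-- pv_equiv track=rewrite | github.com/SSndot/CREAT | utils.py | unpadding
-- ===== SOURCE A (Python) =====
-- def unpadding(fake_seq, start_id):
--     #tensor to list
--     fake_seqs = []
--     id = start_id
--     for fake_data in fake_seq:
--         seq = []
--         seq.append(id)
--         for i, f in enumerate(fake_data):
--             if f != 0:
--                 seq.append(f)
--             else:
--                 # clip when there are two consecutive "0"
--                 if i == (len(fake_data) - 1) or fake_data[i+1] == 0:
--                     break
--                 else:
--                     continue
--         fake_seqs.append(seq)
--         id += 1
--     return fake_seqs
-- ===== SOURCE B (Python) =====
-- def _unpad_one(fake_data):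
--     # phase 1: find the cutoff - first i with fake_data[i]==0 and (last position or next is 0)
--     n = len(fake_data)
--     cutoff = n
--     for i in range(n):
--         if fake_data[i] == 0 and (i == n - 1 or fake_data[i + 1] == 0):
--             cutoff = i
--             break
--     # phase 2: keep the non-zero entries before the cutoff
--     return [f for f in fake_data[:cutoff] if f != 0]
--
-- def unpadding(fake_seq, start_id):
--     return [[start_id + k] + _unpad_one(fd) for k, fd in enumerate(fake_seq)]
-- ===== Notes on version B (the rewrite author's own statement) =====
-- stated objective: alternative
-- what changed: B splits A's single interleaved loop (with break/continue) into two independent phases: first compute the cutoff index (first position of a zero that is last or followed by a zero), then filter the non-zero entries of the prefix before the cutoff, mapping over enumerate(fake_seq) instead of a mutable id counter and accumulator list.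
import Mathlib
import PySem

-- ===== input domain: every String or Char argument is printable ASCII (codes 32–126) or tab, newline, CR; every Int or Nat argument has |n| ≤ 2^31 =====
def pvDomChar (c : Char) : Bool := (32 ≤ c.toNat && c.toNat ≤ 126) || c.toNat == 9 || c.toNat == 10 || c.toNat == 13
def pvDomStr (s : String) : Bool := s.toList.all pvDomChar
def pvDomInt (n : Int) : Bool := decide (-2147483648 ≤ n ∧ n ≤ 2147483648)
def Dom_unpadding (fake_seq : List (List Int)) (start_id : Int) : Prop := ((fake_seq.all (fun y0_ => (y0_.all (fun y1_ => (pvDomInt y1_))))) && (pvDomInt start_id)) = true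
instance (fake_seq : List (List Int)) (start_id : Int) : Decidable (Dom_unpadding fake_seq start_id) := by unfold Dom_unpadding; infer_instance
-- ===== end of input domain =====

-- B is a two-phase re-decomposition (compute the cutoff index, then filter); same values, no speed claim.

-- ===== PORT A =====
-- inner 'for i, f in enumerate(fake_data)' loop, transcribed as index recursion;
-- fd[i+1] is only read when i < len-1, where pyGet? is some (getD 0 never used on the reached branch)
def unpaddingInnerA (fd : List Int) (i : Nat) (seq : List Int) : List Int :=
  if hi : i < fd.length then
    let f := fd[i]
    if f ≠ 0 then unpaddingInnerA fd (i + 1) (seq ++ [f])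
    else if i = fd.length - 1 ∨ fd[i+1]?.getD 0 = 0 then seq  -- break
    else unpaddingInnerA fd (i + 1) seq  -- continue
  else seq                              -- enumerate exhausted: loop ends
termination_by fd.length - i

def unpaddingOuterA (l : List (List Int)) (id : Int) (fake_seqs : List (List Int)) : List (List Int) :=
  match l with
  | [] => fake_seqs
  | fd :: rest => unpaddingOuterA rest (id + 1) (fake_seqs ++ [unpaddingInnerA fd 0 [id]])

def unpadding (fake_seq : List (List Int)) (start_id : Int) : List (List Int) :=
  unpaddingOuterA fake_seq start_id []

-- ===== PORT B =====
-- phase 1: cutoff = first i with fd[i]=0 and (i last or fd[i+1]=0), else len fd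
def cutoffB : List Int → Nat
  | [] => 0
  | [x] => if x = 0 then 0 else 1
  | x :: y :: rest => if x = 0 ∧ y = 0 then 0 else 1 + cutoffB (y :: rest)

-- phase 2: keep the non-zero entries before the cutoff
def unpadOneB (fd : List Int) : List Int :=
  (fd.take (cutoffB fd)).filter (fun f => decide (f ≠ 0))

def unpadding_alt (fake_seq : List (List Int)) (start_id : Int) : List (List Int) :=
  (PySem.List.enumerate fake_seq).map (fun p => (start_id + p.1) :: unpadOneB p.2)

-- ===== PRECONDITION & SPEC =====
def Spec_unpadding (fake_seq : List (List Int)) (start_id : Int) (out : List (List Int)) : Prop := out = unpadding_alt fake_seq start_id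
instance (fake_seq : List (List Int)) (start_id : Int) (out : List (List Int)) : Decidable (Spec_unpadding fake_seq start_id out) := by unfold Spec_unpadding; infer_instance

-- ===== CLAIM (what is proved, stated in full; the proofs are below) =====
def Claim_equal_unpadding : Prop := ∀ (fake_seq : List (List Int)) (start_id : Int), Dom_unpadding fake_seq start_id → Spec_unpadding fake_seq start_id (unpadding fake_seq start_id)

-- ===== LEMMAS AND PROOFS =====

lemma unpadOneB_cons_nz (x : Int) (rest : List Int) (hx : x ≠ 0) :
    unpadOneB (x :: rest) = x :: unpadOneB rest := by
  cases rest with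
  | nil => simp [unpadOneB, cutoffB, hx]
  | cons y r =>
    have hc : cutoffB (x :: y :: r) = 1 + cutoffB (y :: r) := by simp [cutoffB, hx]
    rw [unpadOneB, hc, Nat.add_comm, List.take_succ_cons, List.filter_cons, unpadOneB]
    simp [hx]

lemma unpadOneB_cons_zero_cont (y : Int) (r : List Int) (hy : y ≠ 0) :
    unpadOneB (0 :: y :: r) = unpadOneB (y :: r) := by
  have hc : cutoffB (0 :: y :: r) = 1 + cutoffB (y :: r) := by simp [cutoffB, hy]
  rw [unpadOneB, hc, Nat.add_comm, List.take_succ_cons, List.filter_cons, unpadOneB]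
  simp

lemma innerA_eq (fd : List Int) (i : Nat) (seq : List Int) :
    unpaddingInnerA fd i seq = seq ++ unpadOneB (fd.drop i) := by
  induction hn : fd.length - i using Nat.strong_induction_on generalizing i seq with
  | _ n ih =>
  rw [unpaddingInnerA]
  rcases hd : fd.drop i with _ | ⟨x, rest⟩
  · -- i ≥ length: loop ends
    have hlen : fd.length ≤ i := by
      have := congrArg List.length hd; simp at this; omega
    rw [dif_neg (by omega)]
    simp [unpadOneB, cutoffB]
  · have hi : i < fd.length := by
      have := congrArg List.length hd; simp at this; omega
    have hget : fd[i] = x := by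
      have h0 : (fd.drop i)[0]'(by simp [hd]) = fd[i] := by
        simp [List.getElem_drop]
      rw [← h0]; simp [hd]
    have hdrop1 : fd.drop (i+1) = rest := by
      have : (fd.drop i).drop 1 = fd.drop (i+1) := by rw [List.drop_drop]
      rw [← this, hd]; rfl
    have hget1 : fd[i+1]? = rest[0]? := by
      rw [← hdrop1]
      simp [List.getElem?_drop]
    rw [dif_pos hi]
    simp only [hget]
    by_cases hx : x = 0
    · subst hx
      simp only [ne_eq, not_true_eq_false, if_false]
      rcases rest with _ | ⟨y, r⟩
      · -- drop i = [0]: i is the last index → break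
        have hlast : i = fd.length - 1 := by
          have := congrArg List.length hd; simp at this; omega
        rw [if_pos (Or.inl hlast)]
        simp [unpadOneB, cutoffB]
      · -- not last; look at fd[i+1] = y
        have hne : ¬ i = fd.length - 1 := by
          have := congrArg List.length hd; simp at this; omega
        have hc : fd[i+1]?.getD 0 = y := by rw [hget1]; rfl
        by_cases hy : y = 0
        · rw [if_pos (Or.inr (by rw [hc, hy]))]
          simp [unpadOneB, cutoffB, hy]
        · rw [if_neg (by rw [hc]; tauto)]
          rw [ih (fd.length - (i+1)) (by omega) (i+1) seq rfl, hdrop1,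
            unpadOneB_cons_zero_cont y r hy]
    · simp only [ne_eq, hx, not_false_eq_true, if_true]
      rw [ih (fd.length - (i+1)) (by omega) (i+1) (seq ++ [x]) rfl, hdrop1,
        unpadOneB_cons_nz x rest hx]
      simp

lemma outerA_eq (l : List (List Int)) (id s : Int) (fs : List (List Int)) :
    unpaddingOuterA l id fs
      = fs ++ (PySem.List.enumerate l s).map (fun p => (id + (p.1 - s)) :: unpadOneB p.2) := by
  induction l generalizing id s fs with
  | nil => simp [unpaddingOuterA, PySem.List.enumerate_nil]
  | cons fd rest ih =>
    rw [unpaddingOuterA, ih (id + 1) (s + 1), PySem.List.enumerate_cons,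
      innerA_eq fd 0 [id]]
    simp only [List.drop_zero, List.map_cons, List.append_assoc, List.singleton_append]
    have h1 : id + (s - s) = id := by ring
    rw [h1]
    congr 2
    apply List.map_congr_left
    intro p _
    have h2 : id + 1 + (p.1 - (s + 1)) = id + (p.1 - s) := by ring
    rw [h2]

-- ===== VERDICT (by name: the statement is the Claim_ definition above) =====
theorem unpadding_spec : Claim_equal_unpadding := by
  intro fake_seq start_id _
  show unpadding fake_seq start_id = unpadding_alt fake_seq start_id
  rw [unpadding, outerA_eq fake_seq start_id 0 [], unpadding_alt]
  simp
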